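-- pv_equiv track=rewrite | github.com/arnab-maity007/Algorumble_Nov_28_batch | aryan/one_more/ahshit.py | solve_python_logic
-- ===== SOURCE A (Python) =====
-- def solve_python_logic(n, grid):
--     """
--     Python implementation of the User's C++ logic.
--     Used to generate correct outputs.
--     """
--     ans = 0
--
--     # Logic 1: Lower Triangle + Main Diagonal
--     for k in range(n):
--         row = n - 1 - k
--         col = 0
--         minn = float('inf')
--         while row < n:
--             val = grid[row][col]
--             if val < minn:
--                 minn = val
--             row += 1
--             col += 1
--         if minn < 0:
--             ans = ans - minn
--
--     # Logic 2: Upper Triangle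
--     for k in range(1, n):
--         row = 0
--         col = k
--         minn = float('inf')
--         while col < n:
--             val = grid[row][col]
--             if val < minn:
--                 minn = val
--             row += 1
--             col += 1
--         if minn < 0:
--             ans = ans - minn
--
--     return ans
-- ===== SOURCE B (Python) =====
-- def solve_python_logic(n, grid):
--     # Single row-major pass: per-diagonal (keyed by r - c) running minima
--     # in a flat table, then sum the negated negative minima.
--     mins = [None] * (2 * n - 1)
--     for r in range(n):
--         for c in range(n):
--             v = grid[r][c]
--             i = r - c + n - 1
--             if mins[i] is None or v < mins[i]:
--                 mins[i] = v
--     return sum(-m for m in mins if m is not None and m < 0)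
-- ===== Notes on version B (the rewrite author's own statement) =====
-- stated objective: alternative
-- what changed: A walks each of the 2n-1 diagonals with two separate loop nests (lower+main, then upper); B makes one row-major pass over all cells maintaining a flat per-diagonal minimum table indexed by r-c+n-1, then sums the negated negative minima in one final pass.
import Mathlib
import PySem

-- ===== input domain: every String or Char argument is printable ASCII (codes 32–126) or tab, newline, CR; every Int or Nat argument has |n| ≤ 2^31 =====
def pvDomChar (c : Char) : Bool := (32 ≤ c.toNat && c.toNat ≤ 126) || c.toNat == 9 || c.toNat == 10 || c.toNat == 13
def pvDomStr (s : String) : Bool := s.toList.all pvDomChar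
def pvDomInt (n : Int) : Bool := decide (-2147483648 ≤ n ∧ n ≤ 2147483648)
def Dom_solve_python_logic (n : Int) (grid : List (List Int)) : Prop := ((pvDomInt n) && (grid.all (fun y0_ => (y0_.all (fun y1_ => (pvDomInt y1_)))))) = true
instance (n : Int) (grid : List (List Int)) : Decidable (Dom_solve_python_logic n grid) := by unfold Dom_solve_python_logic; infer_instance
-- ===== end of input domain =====

-- B replaces A's two diagonal-walking loop nests by one row-major pass filling a
-- per-diagonal minimum table, then one pass summing the negated negative minima
-- (objective: alternative single-pass decomposition, same O(n^2) cost).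

-- ===== PORT A =====
-- while row < n: take grid[row][col], update running min, advance both indices
def pvA_walk1 (grid : List (List Int)) (n : Int) : Nat → Int → Int → Option Int → Option Int
  | 0, _, _, minn => minn
  | fuel + 1, row, col, minn =>
    if row < n then
      let val := PySem.List.pyGetD (PySem.List.pyGetD grid row []) col 0
      let minn' := match minn with
        | none => some val
        | some m => if val < m then some val else some m
      pvA_walk1 grid n fuel (row + 1) (col + 1) minn'
    else minn

-- while col < n: same body, loop guarded by col
def pvA_walk2 (grid : List (List Int)) (n : Int) : Nat → Int → Int → Option Int → Option Int
  | 0, _, _, minn => minn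
  | fuel + 1, row, col, minn =>
    if col < n then
      let val := PySem.List.pyGetD (PySem.List.pyGetD grid row []) col 0
      let minn' := match minn with
        | none => some val
        | some m => if val < m then some val else some m
      pvA_walk2 grid n fuel (row + 1) (col + 1) minn'
    else minn

def solve_python_logic (n : Int) (grid : List (List Int)) : Int :=
  let ans : Int := 0
  let ans := (PySem.List.pyRange 0 n 1).foldl (fun ans k =>
    let row := n - 1 - k
    match pvA_walk1 grid n (n - row).toNat row 0 none with
    | none => ans
    | some minn => if minn < 0 then ans - minn else ans) ans
  let ans := (PySem.List.pyRange 1 n 1).foldl (fun ans k =>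
    match pvA_walk2 grid n (n - k).toNat 0 k none with
    | none => ans
    | some minn => if minn < 0 then ans - minn else ans) ans
  ans

-- ===== PORT B =====
def solve_python_logic_alt (n : Int) (grid : List (List Int)) : Int :=
  let mins : List (Option Int) := List.replicate (2 * n - 1).toNat none
  let mins := (PySem.List.pyRange 0 n 1).foldl (fun mins r =>
    (PySem.List.pyRange 0 n 1).foldl (fun mins c =>
      let v := PySem.List.pyGetD (PySem.List.pyGetD grid r []) c 0
      let i := r - c + n - 1
      match PySem.List.pyGetD mins i none with
      | none => PySem.List.pySetD mins i (some v)
      | some m => if v < m then PySem.List.pySetD mins i (some v) else mins) mins) mins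
  mins.foldl (fun acc o => match o with
    | none => acc
    | some m => if m < 0 then acc + (-m) else acc) 0

-- ===== PRECONDITION & SPEC =====
-- Pre_ excludes exactly the inputs on which Python A raises IndexError:
-- for n > 0 it reads every cell grid[r][c] with r, c < n.
def Pre_solve_python_logic (n : Int) (grid : List (List Int)) : Prop :=
  n ≤ (grid.length : Int) ∧ ∀ row ∈ grid.take n.toNat, n ≤ (row.length : Int)
instance (n : Int) (grid : List (List Int)) : Decidable (Pre_solve_python_logic n grid) := by
  unfold Pre_solve_python_logic; infer_instance

def pvWitness_solve_python_logic : Int × List (List Int) := (2, [[1, -2], [3, 4]])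

def Spec_solve_python_logic (n : Int) (grid : List (List Int)) (out : Int) : Prop := out = solve_python_logic_alt n grid
instance (n : Int) (grid : List (List Int)) (out : Int) : Decidable (Spec_solve_python_logic n grid out) := by unfold Spec_solve_python_logic; infer_instance

-- ===== CLAIM (what is proved, stated in full; the proofs are below) =====
def Claim_equal_solve_python_logic : Prop := ∀ (n : Int) (grid : List (List Int)), Dom_solve_python_logic n grid → Pre_solve_python_logic n grid → Spec_solve_python_logic n grid (solve_python_logic n grid)

-- ===== LEMMAS AND PROOFS =====

-- the diagonal key of a cell, and the running-min combinator both programs use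
def pvK (n : Int) (rc : Int × Int) : Int := rc.1 - rc.2 + n - 1

def pvOmin (acc : Option Int) (v : Int) : Option Int :=
  match acc with
  | none => some v
  | some m => some (if v < m then v else m)

def pvGval (grid : List (List Int)) (r c : Int) : Int :=
  PySem.List.pyGetD (PySem.List.pyGetD grid r []) c 0

def pvFoldMin (grid : List (List Int)) (cells : List (Int × Int)) (acc : Option Int) : Option Int :=
  cells.foldl (fun a rc => pvOmin a (pvGval grid rc.1 rc.2)) acc

def pvCells (n : Int) : List (Int × Int) :=
  (PySem.List.pyRange 0 n 1).flatMap (fun r => (PySem.List.pyRange 0 n 1).map (fun c => (r, c)))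

def pvDmin (grid : List (List Int)) (n j : Int) : Option Int :=
  pvFoldMin grid ((pvCells n).filter (fun rc => pvK n rc == j)) none

def pvContrib : Option Int → Int
  | none => 0
  | some m => if m < 0 then -m else 0

-- the `match` in both loop bodies is exactly pvOmin
theorem pvOmin_match (minn : Option Int) (val : Int) :
    (match minn with
      | none => some val
      | some m => if val < m then some val else some m) = pvOmin minn val := by
  cases minn with
  | none => rfl
  | some m =>
    show (if val < m then some val else some m) = _
    simp only [pvOmin]
    split <;> rfl

-- A's first while loop folds pvOmin over its diagonal walk
theorem pvA_walk1_eq (grid : List (List Int)) (n : Int) :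
    ∀ (t : Nat) (row col : Int) (minn : Option Int), row + t ≤ n →
      pvA_walk1 grid n t row col minn =
        pvFoldMin grid ((List.range t).map (fun s : Nat => (row + (s : Int), col + (s : Int)))) minn := by
  intro t
  induction t with
  | zero => intro row col minn _; simp [pvA_walk1, pvFoldMin]
  | succ t ih =>
    intro row col minn h
    have hrow : row < n := by omega
    rw [pvA_walk1, if_pos hrow]
    show pvA_walk1 grid n t (row + 1) (col + 1)
        (match minn with
          | none => some (PySem.List.pyGetD (PySem.List.pyGetD grid row []) col 0)
          | some m => if PySem.List.pyGetD (PySem.List.pyGetD grid row []) col 0 < m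
              then some (PySem.List.pyGetD (PySem.List.pyGetD grid row []) col 0) else some m) = _
    rw [pvOmin_match, ih (row + 1) (col + 1) _ (by omega), List.range_succ_eq_map]
    simp only [pvFoldMin, List.map_cons, List.map_map, List.foldl_cons]
    congr 2
    · simp [pvGval]
    · funext s
      simp only [Function.comp, Nat.succ_eq_add_one, Prod.mk.injEq]
      push_cast
      constructor <;> ring

-- A's second while loop folds pvOmin over its diagonal walk
theorem pvA_walk2_eq (grid : List (List Int)) (n : Int) :
    ∀ (t : Nat) (row col : Int) (minn : Option Int), col + t ≤ n →
      pvA_walk2 grid n t row col minn =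
        pvFoldMin grid ((List.range t).map (fun s : Nat => (row + (s : Int), col + (s : Int)))) minn := by
  intro t
  induction t with
  | zero => intro row col minn _; simp [pvA_walk2, pvFoldMin]
  | succ t ih =>
    intro row col minn h
    have hcol : col < n := by omega
    rw [pvA_walk2, if_pos hcol]
    show pvA_walk2 grid n t (row + 1) (col + 1)
        (match minn with
          | none => some (PySem.List.pyGetD (PySem.List.pyGetD grid row []) col 0)
          | some m => if PySem.List.pyGetD (PySem.List.pyGetD grid row []) col 0 < m
              then some (PySem.List.pyGetD (PySem.List.pyGetD grid row []) col 0) else some m) = _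
    rw [pvOmin_match, ih (row + 1) (col + 1) _ (by omega), List.range_succ_eq_map]
    simp only [pvFoldMin, List.map_cons, List.map_map, List.foldl_cons]
    congr 2
    · simp [pvGval]
    · funext s
      simp only [Function.comp, Nat.succ_eq_add_one, Prod.mk.injEq]
      push_cast
      constructor <;> ring

-- B's update of the table at one cell
def pvStep (grid : List (List Int)) (n : Int) (T : List (Option Int)) (rc : Int × Int) : List (Option Int) :=
  match PySem.List.pyGetD T (pvK n rc) none with
  | none => PySem.List.pySetD T (pvK n rc) (some (pvGval grid rc.1 rc.2))
  | some m =>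
    if pvGval grid rc.1 rc.2 < m then PySem.List.pySetD T (pvK n rc) (some (pvGval grid rc.1 rc.2)) else T

theorem pvStep_length (grid : List (List Int)) (n : Int) (T : List (Option Int)) (rc : Int × Int) :
    (pvStep grid n T rc).length = T.length := by
  unfold pvStep
  split
  · simp [PySem.List.length_pySetD]
  · split
    · simp [PySem.List.length_pySetD]
    · rfl

theorem pvStep_getD (grid : List (List Int)) (n : Int) (T : List (Option Int)) (rc : Int × Int)
    (h0 : 0 ≤ pvK n rc) (h1 : pvK n rc < (T.length : Int)) (j : Nat) :
    (pvStep grid n T rc).getD j none =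
      if pvK n rc = (j : Int) then pvOmin (T.getD j none) (pvGval grid rc.1 rc.2)
      else T.getD j none := by
  have hik : pvK n rc = ((pvK n rc).toNat : Int) := (Int.toNat_of_nonneg h0).symm
  have hlen : (pvK n rc).toNat < T.length := by omega
  have hget : PySem.List.pyGetD T (pvK n rc) none = T[(pvK n rc).toNat] :=
    PySem.List.pyGetD_eq_getElem _ _ h0 h1
  have hset : ∀ v : Option Int, PySem.List.pySetD T (pvK n rc) v = T.set (pvK n rc).toNat v :=
    fun v => PySem.List.pySetD_of_nonneg _ _ h0
  have hTj : ∀ hj : (pvK n rc).toNat = j, T.getD j none = T[(pvK n rc).toNat] := by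
    intro hj
    rw [List.getD_eq_getElem?_getD, ← hj, List.getElem?_eq_getElem hlen]
    rfl
  unfold pvStep
  rw [hget]
  simp only [hset]
  by_cases hj : pvK n rc = (j : Int)
  · have hjm : (pvK n rc).toNat = j := by omega
    rw [if_pos hj, hTj hjm]
    split
    · next heq =>
      rw [heq]
      simp only [pvOmin]
      rw [List.getD_eq_getElem?_getD, ← hjm, List.getElem?_set_self hlen]
      rfl
    · next mv heq =>
      rw [heq]
      simp only [pvOmin]
      split
      · next hlt =>
        rw [List.getD_eq_getElem?_getD, ← hjm, List.getElem?_set_self hlen]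
        simp
      · next hge =>
        rw [List.getD_eq_getElem?_getD, ← hjm, List.getElem?_eq_getElem hlen, heq]
        simp
  · have hjm : (pvK n rc).toNat ≠ j := by omega
    rw [if_neg hj]
    split
    · rw [List.getD_eq_getElem?_getD, List.getElem?_set_ne hjm, ← List.getD_eq_getElem?_getD]
    · split
      · rw [List.getD_eq_getElem?_getD, List.getElem?_set_ne hjm, ← List.getD_eq_getElem?_getD]
      · rfl

-- the table invariant: entry j holds the running min of the cells on diagonal j seen so far
theorem pvFold_table (grid : List (List Int)) (n : Int) :
    ∀ (L : List (Int × Int)) (T : List (Option Int)),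
      (∀ rc ∈ L, 0 ≤ pvK n rc ∧ pvK n rc < (T.length : Int)) →
      (∀ j : Nat, (L.foldl (pvStep grid n) T).getD j none =
          pvFoldMin grid (L.filter (fun rc => pvK n rc == (j : Int))) (T.getD j none)) ∧
        (L.foldl (pvStep grid n) T).length = T.length := by
  intro L
  induction L with
  | nil => intro T _; exact ⟨fun j => rfl, rfl⟩
  | cons rc L ih =>
    intro T hb
    have hrc := hb rc (by simp)
    have hlen : (pvStep grid n T rc).length = T.length := pvStep_length grid n T rc
    have hb' : ∀ x ∈ L, 0 ≤ pvK n x ∧ pvK n x < ((pvStep grid n T rc).length : Int) := by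
      intro x hx
      rw [hlen]
      exact hb x (by simp [hx])
    obtain ⟨ihg, ihl⟩ := ih (pvStep grid n T rc) hb'
    refine ⟨fun j => ?_, by rw [List.foldl_cons, ihl, hlen]⟩
    rw [List.foldl_cons, ihg j, pvStep_getD grid n T rc hrc.1 hrc.2 j]
    rw [List.filter_cons]
    by_cases hj : pvK n rc = (j : Int)
    · have : (pvK n rc == (j : Int)) = true := by simp [hj]
      rw [this, if_pos hj]
      simp [pvFoldMin]
    · have : (pvK n rc == (j : Int)) = false := by simp [hj]
      rw [this, if_neg hj]
      simp

theorem pv_range_filter_beq (m : Nat) : ∀ t : Nat,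
    (List.range t).filter (fun k => k == m) = if m < t then [m] else [] := by
  intro t
  induction t with
  | zero => simp
  | succ t ih =>
    rw [List.range_succ, List.filter_append, ih, List.filter_singleton]
    rcases Nat.lt_trichotomy m t with h | h | h
    · rw [if_pos h, if_pos (by omega)]
      have hbe : (t == m) = false := by simp; omega
      rw [hbe]
      simp
    · subst h
      rw [if_neg (by omega), if_pos (by omega)]
      simp
    · rw [if_neg (by omega), if_neg (by omega)]
      have hbe : (t == m) = false := by simp; omega
      rw [hbe]
      simp

theorem pv_filter_pyRange_eq (a b c0 : Int) :
    (PySem.List.pyRange a b 1).filter (fun c => c == c0) =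
      if a ≤ c0 ∧ c0 < b then [c0] else [] := by
  rw [PySem.List.pyRange_one, List.filter_map]
  by_cases hc : a ≤ c0
  · have hfun : ((fun c : Int => c == c0) ∘ fun k : Nat => a + (k : Int)) =
        fun k : Nat => k == (c0 - a).toNat := by
      funext k
      show ((a + (k : Int)) == c0) = (k == (c0 - a).toNat)
      rw [Bool.eq_iff_iff, beq_iff_eq, beq_iff_eq]
      omega
    rw [hfun, pv_range_filter_beq]
    by_cases h2 : c0 < b
    · rw [if_pos (by omega), if_pos ⟨hc, h2⟩]
      simp only [List.map_cons, List.map_nil, List.cons.injEq, and_true]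
      omega
    · rw [if_neg (by omega), if_neg (by omega)]
      simp
  · have hfun : ((fun c : Int => c == c0) ∘ fun k : Nat => a + (k : Int)) =
        fun _ : Nat => false := by
      funext k
      show ((a + (k : Int)) == c0) = false
      rw [Bool.eq_iff_iff, beq_iff_eq]
      simp only [Bool.false_eq_true, iff_false]
      omega
    rw [hfun, if_neg (by omega)]
    simp

theorem pv_flatMap_eq_map (l : List Int) (f : Int → List (Int × Int)) (g : Int → Int × Int)
    (h : ∀ a ∈ l, f a = [g a]) : l.flatMap f = l.map g := by
  induction l with
  | nil => simp
  | cons x xs ih =>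
    simp only [List.flatMap_cons, List.map_cons, h x (by simp)]
    rw [ih (fun a ha => h a (by simp [ha]))]
    rfl

theorem pv_diag_lower (n j : Int) (h1 : n - 1 ≤ j) (h2 : j ≤ 2 * n - 2) :
    (pvCells n).filter (fun rc => pvK n rc == j) =
      (List.range (n - (j - (n - 1))).toNat).map (fun s : Nat => (j - (n - 1) + (s : Int), (s : Int))) := by
  have hn : 1 ≤ n := by omega
  set d : Int := j - (n - 1) with hd
  have hd0 : 0 ≤ d := by omega
  have hd1 : d ≤ n - 1 := by omega
  unfold pvCells
  rw [List.filter_flatMap]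
  have hinner : ∀ r : Int, ((PySem.List.pyRange 0 n 1).map (fun c => (r, c))).filter
      (fun rc => pvK n rc == j) =
      if 0 ≤ r - d ∧ r - d < n then [(r, r - d)] else [] := by
    intro r
    rw [List.filter_map]
    have hfun : ((fun rc : Int × Int => pvK n rc == j) ∘ fun c => (r, c)) =
        fun c : Int => c == r - d := by
      funext c
      show (pvK n (r, c) == j) = (c == r - d)
      rw [Bool.eq_iff_iff, beq_iff_eq, beq_iff_eq]
      simp only [pvK]
      omega
    rw [hfun, pv_filter_pyRange_eq]
    split
    · simp
    · simp
  simp only [hinner]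
  rw [PySem.List.pyRange_one_append 0 d n (by omega) (by omega), List.flatMap_append]
  have h1 : (PySem.List.pyRange 0 d 1).flatMap
      (fun r => if 0 ≤ r - d ∧ r - d < n then [(r, r - d)] else []) = [] := by
    apply List.flatMap_eq_nil_iff.mpr
    intro r hr
    rw [PySem.List.mem_pyRange_one] at hr
    rw [if_neg (by omega)]
  have h2 : (PySem.List.pyRange d n 1).flatMap
      (fun r => if 0 ≤ r - d ∧ r - d < n then [(r, r - d)] else []) =
      (PySem.List.pyRange d n 1).map (fun r => (r, r - d)) := by
    apply pv_flatMap_eq_map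
    intro r hr
    rw [PySem.List.mem_pyRange_one] at hr
    rw [if_pos (by omega)]
  rw [h1, h2, List.nil_append, PySem.List.pyRange_one d n, List.map_map]
  apply List.map_congr_left
  intro s _
  simp only [Function.comp, Prod.mk.injEq]
  exact ⟨trivial, by omega⟩

theorem pv_diag_upper (n j : Int) (h0 : 0 ≤ j) (h1 : j < n - 1) :
    (pvCells n).filter (fun rc => pvK n rc == j) =
      (List.range (n - (n - 1 - j)).toNat).map (fun s : Nat => ((s : Int), n - 1 - j + (s : Int))) := by
  have hn : 2 ≤ n := by omega
  set k0 : Int := n - 1 - j with hk0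
  have hk1 : 1 ≤ k0 := by omega
  have hk2 : k0 ≤ n - 1 := by omega
  unfold pvCells
  rw [List.filter_flatMap]
  have hinner : ∀ r : Int, ((PySem.List.pyRange 0 n 1).map (fun c => (r, c))).filter
      (fun rc => pvK n rc == j) =
      if 0 ≤ r + k0 ∧ r + k0 < n then [(r, r + k0)] else [] := by
    intro r
    rw [List.filter_map]
    have hfun : ((fun rc : Int × Int => pvK n rc == j) ∘ fun c => (r, c)) =
        fun c : Int => c == r + k0 := by
      funext c
      show (pvK n (r, c) == j) = (c == r + k0)
      rw [Bool.eq_iff_iff, beq_iff_eq, beq_iff_eq]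
      simp only [pvK]
      omega
    rw [hfun, pv_filter_pyRange_eq]
    split
    · simp
    · simp
  simp only [hinner]
  rw [PySem.List.pyRange_one_append 0 (n - k0) n (by omega) (by omega), List.flatMap_append]
  have h1 : (PySem.List.pyRange 0 (n - k0) 1).flatMap
      (fun r => if 0 ≤ r + k0 ∧ r + k0 < n then [(r, r + k0)] else []) =
      (PySem.List.pyRange 0 (n - k0) 1).map (fun r => (r, r + k0)) := by
    apply pv_flatMap_eq_map
    intro r hr
    rw [PySem.List.mem_pyRange_one] at hr
    rw [if_pos (by omega)]
  have h2 : (PySem.List.pyRange (n - k0) n 1).flatMap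
      (fun r => if 0 ≤ r + k0 ∧ r + k0 < n then [(r, r + k0)] else []) = [] := by
    apply List.flatMap_eq_nil_iff.mpr
    intro r hr
    rw [PySem.List.mem_pyRange_one] at hr
    rw [if_neg (by omega)]
  rw [h1, h2, List.append_nil, PySem.List.pyRange_one 0 (n - k0), List.map_map]
  simp only [sub_zero]
  apply List.map_congr_left
  intro s _
  simp only [Function.comp, Prod.mk.injEq]
  exact ⟨by omega, by omega⟩

theorem pv_foldl_flatMap {α β γ : Type} (l : List α) (f : α → List β) (g : γ → β → γ) :
    ∀ init : γ, (l.flatMap f).foldl g init = l.foldl (fun acc a => (f a).foldl g acc) init := by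
  induction l with
  | nil => intro init; rfl
  | cons x xs ih =>
    intro init
    rw [List.flatMap_cons, List.foldl_append, List.foldl_cons, ih]

theorem pv_map_getD (l : List (Option Int)) (f : Option Int → Int) :
    l.map f = (List.range l.length).map (fun j => f (l.getD j none)) := by
  apply List.ext_getElem
  · simp
  · intro i h1 h2
    simp only [List.getElem_map, List.getElem_range]
    rw [List.getD_eq_getElem?_getD, List.getElem?_eq_getElem (by simpa using h1)]
    rfl

theorem pv_alt_eq_sum (n : Int) (grid : List (List Int)) :
    solve_python_logic_alt n grid =
      ((List.range (2 * n - 1).toNat).map (fun j : Nat => pvContrib (pvDmin grid n (j : Int)))).sum := by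
  have hbounds : ∀ rc ∈ pvCells n, 0 ≤ pvK n rc ∧
      pvK n rc < ((List.replicate (2 * n - 1).toNat (none : Option Int)).length : Int) := by
    intro rc hrc
    unfold pvCells at hrc
    rw [List.mem_flatMap] at hrc
    obtain ⟨r, hr, hrc⟩ := hrc
    rw [List.mem_map] at hrc
    obtain ⟨c, hc, rfl⟩ := hrc
    rw [PySem.List.mem_pyRange_one] at hr hc
    rw [List.length_replicate]
    simp only [pvK]
    omega
  have htable : (PySem.List.pyRange 0 n 1).foldl
      (fun mins r => (PySem.List.pyRange 0 n 1).foldl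
        (fun mins c =>
          let v := PySem.List.pyGetD (PySem.List.pyGetD grid r []) c 0
          let i := r - c + n - 1
          match PySem.List.pyGetD mins i none with
          | none => PySem.List.pySetD mins i (some v)
          | some m => if v < m then PySem.List.pySetD mins i (some v) else mins) mins)
      (List.replicate (2 * n - 1).toNat none) =
      (pvCells n).foldl (pvStep grid n) (List.replicate (2 * n - 1).toNat none) := by
    unfold pvCells
    rw [pv_foldl_flatMap]
    congr 1
    funext acc r
    rw [List.foldl_map]
    rfl
  obtain ⟨hg, hl⟩ := pvFold_table grid n (pvCells n) (List.replicate (2 * n - 1).toNat none) hbounds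
  simp only [solve_python_logic_alt]
  rw [htable]
  have hbody : (fun (acc : Int) (o : Option Int) =>
      match o with
      | none => acc
      | some m => if m < 0 then acc + (-m) else acc) = fun acc o => acc + pvContrib o := by
    funext acc o
    cases o with
    | none => simp [pvContrib]
    | some m =>
      show (if m < 0 then acc + (-m) else acc) = acc + pvContrib (some m)
      simp only [pvContrib]
      split <;> simp
  rw [hbody, PySem.List.foldl_add, zero_add, pv_map_getD, hl, List.length_replicate]
  apply congrArg List.sum
  apply List.map_congr_left
  intro j _
  rw [hg j]
  have hrep : (List.replicate (2 * n - 1).toNat (none : Option Int)).getD j none = none := by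
    rw [List.getD_eq_getElem?_getD, List.getElem?_replicate]
    split <;> rfl
  rw [hrep]
  rfl

theorem pv_a_eq_sum (n : Int) (grid : List (List Int)) :
    solve_python_logic n grid =
      ((PySem.List.pyRange 0 n 1).map (fun k => pvContrib (pvDmin grid n (2 * n - 2 - k)))).sum +
        ((PySem.List.pyRange 1 n 1).map (fun k => pvContrib (pvDmin grid n (n - 1 - k)))).sum := by
  have hb1 : (fun (ans k : Int) =>
      let row := n - 1 - k
      match pvA_walk1 grid n (n - row).toNat row 0 none with
      | none => ans
      | some minn => if minn < 0 then ans - minn else ans) =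
      fun (ans k : Int) => ans + pvContrib (pvA_walk1 grid n (n - (n - 1 - k)).toNat (n - 1 - k) 0 none) := by
    funext ans k
    show (match pvA_walk1 grid n (n - (n - 1 - k)).toNat (n - 1 - k) 0 none with
      | none => ans
      | some minn => if minn < 0 then ans - minn else ans) = _
    cases h : pvA_walk1 grid n (n - (n - 1 - k)).toNat (n - 1 - k) 0 none with
    | none => simp [pvContrib]
    | some m =>
      simp only [pvContrib]
      split <;> [rw [Int.sub_eq_add_neg]; rw [Int.add_zero]]
  have hb2 : (fun (ans k : Int) =>
      match pvA_walk2 grid n (n - k).toNat 0 k none with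
      | none => ans
      | some minn => if minn < 0 then ans - minn else ans) =
      fun (ans k : Int) => ans + pvContrib (pvA_walk2 grid n (n - k).toNat 0 k none) := by
    funext ans k
    show (match pvA_walk2 grid n (n - k).toNat 0 k none with
      | none => ans
      | some minn => if minn < 0 then ans - minn else ans) = _
    cases h : pvA_walk2 grid n (n - k).toNat 0 k none with
    | none => simp [pvContrib]
    | some m =>
      simp only [pvContrib]
      split <;> [rw [Int.sub_eq_add_neg]; rw [Int.add_zero]]
  show (PySem.List.pyRange 1 n 1).foldl _ ((PySem.List.pyRange 0 n 1).foldl _ (0 : Int)) = _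
  rw [hb1, hb2, PySem.List.foldl_add, PySem.List.foldl_add, zero_add]
  congr 1
  · apply congrArg List.sum
    apply List.map_congr_left
    intro k hk
    rw [PySem.List.mem_pyRange_one] at hk
    rw [pvA_walk1_eq grid n _ _ _ _ (by omega)]
    unfold pvDmin
    rw [pv_diag_lower n (2 * n - 2 - k) (by omega) (by omega)]
    have harg : (n - (2 * n - 2 - k - (n - 1))).toNat = (n - (n - 1 - k)).toNat := by omega
    rw [harg]
    have hlist : (List.range (n - (n - 1 - k)).toNat).map
        (fun s : Nat => (2 * n - 2 - k - (n - 1) + (s : Int), (s : Int))) =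
        (List.range (n - (n - 1 - k)).toNat).map
        (fun s : Nat => (n - 1 - k + (s : Int), 0 + (s : Int))) := by
      apply List.map_congr_left
      intro s _
      simp only [Prod.mk.injEq]
      exact ⟨by ring, by ring⟩
    rw [hlist]
  · apply congrArg List.sum
    apply List.map_congr_left
    intro k hk
    rw [PySem.List.mem_pyRange_one] at hk
    rw [pvA_walk2_eq grid n _ _ _ _ (by omega)]
    unfold pvDmin
    rw [pv_diag_upper n (n - 1 - k) (by omega) (by omega)]
    have harg : (n - (n - 1 - (n - 1 - k))).toNat = (n - k).toNat := by omega
    rw [harg]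
    have hlist : (List.range (n - k).toNat).map
        (fun s : Nat => ((s : Int), n - 1 - (n - 1 - k) + (s : Int))) =
        (List.range (n - k).toNat).map
        (fun s : Nat => (0 + (s : Int), k + (s : Int))) := by
      apply List.map_congr_left
      intro s _
      simp only [Prod.mk.injEq]
      exact ⟨by ring, by ring⟩
    rw [hlist]

theorem pv_sum_reflect (F : Nat → Int) (t : Nat) :
    ((List.range t).map (fun k => F (t - 1 - k))).sum = ((List.range t).map F).sum := by
  have h : (List.range t).map (fun k => t - 1 - k) = (List.range t).reverse := by
    apply List.ext_getElem
    · simp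
    · intro i h1 h2
      simp [List.getElem_reverse]
  calc ((List.range t).map (fun k => F (t - 1 - k))).sum
      = (((List.range t).map (fun k => t - 1 - k)).map F).sum := by rw [List.map_map]; rfl
    _ = ((List.range t).reverse.map F).sum := by rw [h]
    _ = (((List.range t).map F).reverse).sum := by rw [List.map_reverse]
    _ = ((List.range t).map F).sum := List.sum_reverse _

theorem pv_sum_split (F : Nat → Int) (N : Nat) (hN : 0 < N) :
    ((List.range N).map (fun k => F (2 * N - 2 - k))).sum +
        ((List.range (N - 1)).map (fun k => F (N - 2 - k))).sum =
      ((List.range (2 * N - 1)).map F).sum := by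
  have e1 : ((List.range N).map (fun k => F (2 * N - 2 - k))).sum =
      ((List.range N).map (fun k => F (N - 1 + k))).sum := by
    rw [← pv_sum_reflect (fun k => F (N - 1 + k)) N]
    apply congrArg List.sum
    apply List.map_congr_left
    intro k hk
    rw [List.mem_range] at hk
    congr 1
    omega
  have e2 : ((List.range (N - 1)).map (fun k => F (N - 2 - k))).sum =
      ((List.range (N - 1)).map F).sum := by
    rw [← pv_sum_reflect F (N - 1)]
    apply congrArg List.sum
    apply List.map_congr_left
    intro k _
    have h : N - 2 - k = N - 1 - 1 - k := by omega
    rw [h]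
  have e3 : 2 * N - 1 = (N - 1) + N := by omega
  rw [e1, e2, e3, List.range_add, List.map_append, List.sum_append, List.map_map]
  have e4 : (List.range N).map (F ∘ fun x => N - 1 + x) =
      (List.range N).map (fun k => F (N - 1 + k)) := rfl
  rw [e4]
  exact add_comm _ _

-- ===== VERDICT (by name: the statement is the Claim_ definition above) =====
theorem solve_python_logic_spec : Claim_equal_solve_python_logic := by
  intro n grid _ _
  unfold Spec_solve_python_logic
  rw [pv_a_eq_sum, pv_alt_eq_sum]
  by_cases hn : 0 < n
  · have e0 : (n - 0).toNat = n.toNat := by omega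
    have e1 : (n - 1).toNat = n.toNat - 1 := by omega
    have e2 : (2 * n - 1).toNat = 2 * n.toNat - 1 := by omega
    rw [PySem.List.pyRange_one 0 n, PySem.List.pyRange_one 1 n, List.map_map, List.map_map,
      e0, e1, e2]
    have h1 : ((List.range n.toNat).map
        ((fun k => pvContrib (pvDmin grid n (2 * n - 2 - k))) ∘ fun k : Nat => 0 + (k : Int))).sum =
        ((List.range n.toNat).map
          (fun k : Nat => (fun j : Nat => pvContrib (pvDmin grid n (j : Int))) (2 * n.toNat - 2 - k))).sum := by
      apply congrArg List.sum
      apply List.map_congr_left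
      intro k hk
      rw [List.mem_range] at hk
      simp only [Function.comp]
      have harg : 2 * n - 2 - (0 + (k : Int)) = ((2 * n.toNat - 2 - k : Nat) : Int) := by omega
      rw [harg]
    have h2 : ((List.range (n.toNat - 1)).map
        ((fun k => pvContrib (pvDmin grid n (n - 1 - k))) ∘ fun k : Nat => 1 + (k : Int))).sum =
        ((List.range (n.toNat - 1)).map
          (fun k : Nat => (fun j : Nat => pvContrib (pvDmin grid n (j : Int))) (n.toNat - 2 - k))).sum := by
      apply congrArg List.sum
      apply List.map_congr_left
      intro k hk
      rw [List.mem_range] at hk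
      simp only [Function.comp]
      have harg : n - 1 - (1 + (k : Int)) = ((n.toNat - 2 - k : Nat) : Int) := by omega
      rw [harg]
    rw [h1, h2]
    exact pv_sum_split (fun j : Nat => pvContrib (pvDmin grid n (j : Int))) n.toNat (by omega)
  · have e1 : (n - 0).toNat = 0 := by omega
    have e2 : (n - 1).toNat = 0 := by omega
    have e3 : (2 * n - 1).toNat = 0 := by omega
    rw [PySem.List.pyRange_one 0 n, PySem.List.pyRange_one 1 n, e1, e2, e3]
    simp
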